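-- pv_equiv track=rewrite | github.com/Gonza-e/Aed- | Python/SpyNum.py | numSpy
-- ===== SOURCE A (Python) =====
-- def numSpy(num,num1,sum,prod: int) -> bool:
--     if num1 == 0:
--         if sum == prod:
--             return True
--         else:
--             return False
--     else:
--         return numSpy(num,num1 // 10,sum + (num1 % 10),prod *(num1 % 10))
-- ===== SOURCE B (Python) =====
-- def numSpy(num, num1, sum, prod: int) -> bool:
--     # two-phase: collect the digits first, then fold sum/product over the list
--     ds = []
--     while num1 != 0:
--         num1, d = divmod(num1, 10)
--         ds.append(d)
--     t, p = sum, prod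
--     for d in ds:
--         t += d
--         p *= d
--     return t == p
-- ===== Notes on version B (the rewrite author's own statement) =====
-- stated objective: idiomatic
-- what changed: Replaces the 4-accumulator tail recursion by an iterative two-phase version: first collect the digits with divmod into a list, then fold sum and product over that list.
import Mathlib
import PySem

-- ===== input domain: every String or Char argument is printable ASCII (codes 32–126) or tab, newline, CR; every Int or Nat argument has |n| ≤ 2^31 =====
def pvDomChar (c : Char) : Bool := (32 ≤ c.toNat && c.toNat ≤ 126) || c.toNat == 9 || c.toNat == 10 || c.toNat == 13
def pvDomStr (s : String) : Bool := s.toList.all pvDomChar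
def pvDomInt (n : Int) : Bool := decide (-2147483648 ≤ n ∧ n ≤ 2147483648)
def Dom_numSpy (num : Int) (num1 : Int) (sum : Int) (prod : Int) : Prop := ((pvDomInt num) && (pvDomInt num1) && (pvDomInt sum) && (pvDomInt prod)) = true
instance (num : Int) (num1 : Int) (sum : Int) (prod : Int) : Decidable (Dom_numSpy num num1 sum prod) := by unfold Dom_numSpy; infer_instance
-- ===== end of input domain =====

-- B is the same digit-sum = digit-product check written iteratively in two phases
-- (collect digits, then fold); Pre_ restricts to num1 ≥ 0, where A terminates.

-- ===== PORT A =====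
-- literal port of A's tail recursion; the 'num1 < 0' branch only makes the
-- recursion total in Lean (Python A never terminates there; Pre_ excludes it)
def numSpy (num : Int) (num1 : Int) (sum : Int) (prod : Int) : Bool :=
  if num1 = 0 then
    (if sum = prod then true else false)
  else if _h : num1 < 0 then
    false
  else
    numSpy num (PySem.Int.floordiv num1 10) (sum + PySem.Int.mod num1 10)
      (prod * PySem.Int.mod num1 10)
termination_by num1.toNat
decreasing_by
  have h10 : (0:Int) < 10 := by omega
  rw [PySem.Int.floordiv_eq_ediv_of_pos h10]
  omega

-- ===== PORT B =====
-- phase 1 of Source B: the while loop collecting digits (append order = cons order here,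
-- least-significant first, exactly the order Source B's second loop consumes them);
-- the 'num1 < 0' branch again only makes it total (Pre_ excludes it).
def numSpyDigits (num1 : Int) : List Int :=
  if num1 = 0 then []
  else if _h : num1 < 0 then []
  else PySem.Int.mod num1 10 :: numSpyDigits (PySem.Int.floordiv num1 10)
termination_by num1.toNat
decreasing_by
  have h10 : (0:Int) < 10 := by omega
  rw [PySem.Int.floordiv_eq_ediv_of_pos h10]
  omega

def numSpy_alt (num : Int) (num1 : Int) (sum : Int) (prod : Int) : Bool :=
  let ds := numSpyDigits num1
  let tp := ds.foldl (fun (tp : Int × Int) d => (tp.1 + d, tp.2 * d)) (sum, prod)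
  decide (tp.1 = tp.2)

-- ===== PRECONDITION & SPEC =====
-- Pre_ excludes num1 < 0: there Python A recurses forever (RecursionError) and B's loop hangs.
def Pre_numSpy (num : Int) (num1 : Int) (sum : Int) (prod : Int) : Prop := 0 ≤ num1
instance (num : Int) (num1 : Int) (sum : Int) (prod : Int) : Decidable (Pre_numSpy num num1 sum prod) := by unfold Pre_numSpy; infer_instance
def pvWitness_numSpy : Int × Int × Int × Int := (22, 22, 0, 1)

def Spec_numSpy (num : Int) (num1 : Int) (sum : Int) (prod : Int) (out : Bool) : Prop := out = numSpy_alt num num1 sum prod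
instance (num : Int) (num1 : Int) (sum : Int) (prod : Int) (out : Bool) : Decidable (Spec_numSpy num num1 sum prod out) := by unfold Spec_numSpy; infer_instance

-- ===== CLAIM (what is proved, stated in full; the proofs are below) =====
def Claim_equal_numSpy : Prop := ∀ (num : Int) (num1 : Int) (sum : Int) (prod : Int), Dom_numSpy num num1 sum prod → Pre_numSpy num num1 sum prod → Spec_numSpy num num1 sum prod (numSpy num num1 sum prod)

-- ===== LEMMAS AND PROOFS =====

theorem numSpy_alt_step (num num1 sum prod : Int) (h0 : num1 ≠ 0) (hn : ¬ num1 < 0) :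
    numSpy_alt num num1 sum prod =
      numSpy_alt num (PySem.Int.floordiv num1 10) (sum + PySem.Int.mod num1 10)
        (prod * PySem.Int.mod num1 10) := by
  unfold numSpy_alt
  rw [numSpyDigits]
  simp [h0, hn]

theorem numSpy_eq_alt (n : Nat) : ∀ (num1 : Int), num1.toNat = n → 0 ≤ num1 →
    ∀ (num sum prod : Int), numSpy num num1 sum prod = numSpy_alt num num1 sum prod := by
  induction n using Nat.strong_induction_on with
  | _ n ih =>
    intro num1 hn hpos num sum prod
    by_cases h0 : num1 = 0
    · subst h0
      rw [numSpy]
      unfold numSpy_alt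
      rw [numSpyDigits]
      simp
    · have hneg : ¬ num1 < 0 := by omega
      rw [numSpy]
      simp only [h0, if_false, dif_neg hneg]
      rw [numSpy_alt_step num num1 sum prod h0 hneg]
      have hfd : PySem.Int.floordiv num1 10 = num1 / 10 :=
        PySem.Int.floordiv_eq_ediv_of_pos (by omega)
      apply ih (PySem.Int.floordiv num1 10).toNat ?_ _ rfl ?_
      · rw [hfd]; omega
      · rw [hfd]; omega

-- ===== VERDICT (by name: the statement is the Claim_ definition above) =====
theorem numSpy_spec : Claim_equal_numSpy := by
  intro num num1 sum prod _hd hp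
  exact numSpy_eq_alt num1.toNat num1 rfl hp num sum prod
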